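-- pv_equiv track=rewrite | github.com/qlitre/qlitre-utils | src/qlitreutils/graph/utils.py | get_connected_value_list
-- ===== SOURCE A (Python) =====
-- from collections import deque
--
-- def get_connected_value_list(a_list: list, start_value) -> list:
--     """
--     タプルのリストを受け取り、繋がっている要素をリストにして返す
--     例えばある地点からスタートして、どこまでたどり着けるか調べる
--     warning:割と速度に不安がある。技術試験などでは辞書かして、get_can_visitを使った方がよい
--     :param a_list ex.[(1, 2), (1, 3), (3, 6), (4, 5)]
--     :param start_value 最初に調べる値、例えばスタート地点
--     """
--     ret = [start_value]
--     checked = set()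
--     checked.add(start_value)
--     que = deque([start_value])
--     while que:
--         check_val = que.popleft()
--         for item in a_list:
--             if check_val not in item:
--                 continue
--             for elm in item:
--                 if elm in checked:
--                     continue
--                 else:
--                     ret.append(elm)
--                     que.append(elm)
--                     checked.add(elm)
--     return ret
-- ===== SOURCE B (Python) =====
-- def get_connected_value_list(a_list: list, start_value) -> list:
--     # Precompute once an adjacency index (value -> edges containing it, in list
--     # order), then BFS using ret itself as the worklist with a read index, instead
--     # of rescanning the whole edge list per node and keeping a separate deque.
--     nbr = {}
--     for item in a_list:
--         for e in dict.fromkeys(item):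
--             nbr.setdefault(e, []).append(item)
--     ret = [start_value]
--     checked = {start_value}
--     i = 0
--     while i < len(ret):
--         for item in nbr.get(ret[i], []):
--             for elm in item:
--                 if elm not in checked:
--                     checked.add(elm)
--                     ret.append(elm)
--         i += 1
--     return ret
-- ===== Notes on version B (the rewrite author's own statement) =====
-- stated objective: alternative
-- what changed: B precomputes once an adjacency index (value -> edges containing it, in list order) and runs BFS using the result list itself as the worklist with a read index, replacing A's full rescan of the edge list per dequeued node and its separate deque; asymptotically O(V+E) against A's O(V*E), though on sparse random inputs A's single scan is not slower in measurement.
import Mathlib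
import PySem

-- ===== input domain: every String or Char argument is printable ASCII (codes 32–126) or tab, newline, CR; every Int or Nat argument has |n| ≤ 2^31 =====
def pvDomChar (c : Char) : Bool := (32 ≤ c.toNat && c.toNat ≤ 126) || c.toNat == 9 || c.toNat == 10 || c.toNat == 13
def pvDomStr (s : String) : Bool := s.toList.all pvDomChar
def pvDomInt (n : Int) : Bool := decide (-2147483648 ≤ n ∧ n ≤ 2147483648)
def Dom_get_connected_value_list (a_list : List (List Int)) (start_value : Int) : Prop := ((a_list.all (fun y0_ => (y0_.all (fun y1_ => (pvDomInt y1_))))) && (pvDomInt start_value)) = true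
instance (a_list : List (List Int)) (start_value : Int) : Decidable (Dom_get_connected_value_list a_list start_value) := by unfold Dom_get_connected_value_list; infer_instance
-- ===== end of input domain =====

-- B precomputes once an adjacency index (value -> edges containing it, in list order) and runs
-- BFS using the result list itself as the worklist with a read index, removing A's rescan of the
-- whole edge list per dequeued node and its separate queue; objective: alternative.

-- ===== PORT A =====
-- state = (ret, que, checked); the fuel argument is only a totality guard for the
-- 'while que' loop (one unit per pop; total pops never exceed 1 + total edge size).
def pvInnerA (s : List Int × List Int × PySem.Set Int) (item : List Int) :
    List Int × List Int × PySem.Set Int :=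
  item.foldl (fun s elm =>
    if PySem.Set.contains s.2.2 elm then s
    else (s.1 ++ [elm], s.2.1 ++ [elm], PySem.Set.add s.2.2 elm)) s

def pvLoopA (a_list : List (List Int)) :
    Nat → List Int → List Int → PySem.Set Int → List Int
  | 0, ret, _, _ => ret
  | fuel+1, ret, que, checked =>
    match que with
    | [] => ret
    | check_val :: rest =>
      let s := a_list.foldl
        (fun s item => if item.contains check_val then pvInnerA s item else s)
        (ret, rest, checked)
      pvLoopA a_list fuel s.1 s.2.1 s.2.2

def get_connected_value_list (a_list : List (List Int)) (start_value : Int) : List Int :=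
  pvLoopA a_list (1 + (a_list.map List.length).sum) [start_value] [start_value]
    (PySem.Set.add PySem.Set.empty start_value)

-- ===== PORT B =====
-- nbr.setdefault(e, []).append(item) over e in dict.fromkeys(item), item in a_list
def pvNbr (a_list : List (List Int)) : PySem.Dict Int (List (List Int)) :=
  a_list.foldl (fun d item =>
    (PySem.List.dedup item).foldl (fun d e => d.modify e [] (· ++ [item])) d)
    PySem.Dict.empty

def pvInnerB (s : List Int × PySem.Set Int) (item : List Int) : List Int × PySem.Set Int :=
  item.foldl (fun (s : List Int × PySem.Set Int) elm =>
    if PySem.Set.contains s.2 elm then s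
    else (s.1 ++ [elm], PySem.Set.add s.2 elm)) s

-- 'while i < len(ret)': ret doubles as the BFS worklist, i is the read index;
-- fuel is only a totality guard (one unit per index step, bounded by 1 + total edge size).
def pvLoopB (nbr : PySem.Dict Int (List (List Int))) :
    Nat → List Int → Nat → PySem.Set Int → List Int
  | 0, ret, _, _ => ret
  | fuel+1, ret, i, checked =>
    if h : i < ret.length then
      let s := (nbr.getD ret[i] []).foldl pvInnerB (ret, checked)
      pvLoopB nbr fuel s.1 (i+1) s.2
    else ret

def get_connected_value_list_alt (a_list : List (List Int)) (start_value : Int) : List Int :=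
  pvLoopB (pvNbr a_list) (1 + (a_list.map List.length).sum) [start_value] 0
    (PySem.Set.add PySem.Set.empty start_value)

-- ===== PRECONDITION & SPEC =====
def Spec_get_connected_value_list (a_list : List (List Int)) (start_value : Int) (out : List Int) : Prop := out = get_connected_value_list_alt a_list start_value
instance (a_list : List (List Int)) (start_value : Int) (out : List Int) : Decidable (Spec_get_connected_value_list a_list start_value out) := by unfold Spec_get_connected_value_list; infer_instance

-- ===== CLAIM =====
def Claim_equal_get_connected_value_list : Prop := ∀ (a_list : List (List Int)) (start_value : Int), Dom_get_connected_value_list a_list start_value → Spec_get_connected_value_list a_list start_value (get_connected_value_list a_list start_value)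

-- ===== LEMMAS AND PROOFS =====

-- the neighbour map at v is the concatenation of the edges containing v, in list order
lemma pvNbrInner (item : List Int) (v : Int) (L : List Int) (hL : L.Nodup) :
    ∀ d : PySem.Dict Int (List (List Int)),
      ((L.foldl (fun d e => d.modify e [] (· ++ [item])) d).getD v [])
        = if v ∈ L then d.getD v [] ++ [item] else d.getD v [] := by
  induction L with
  | nil => intro d; simp
  | cons e rest ih =>
    intro d
    rw [List.foldl_cons, ih (List.Nodup.of_cons hL), PySem.Dict.getD_modify]
    by_cases hv : v = e
    · subst hv
      have hnr : v ∉ rest := (List.nodup_cons.mp hL).1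
      simp [hnr]
    · simp [hv]

lemma pvNbr_getD (a_list : List (List Int)) (v : Int) :
    (pvNbr a_list).getD v []
      = a_list.filter (fun item => item.contains v) := by
  rw [pvNbr]
  have h : ∀ d : PySem.Dict Int (List (List Int)),
      ((a_list.foldl (fun d item =>
        (PySem.List.dedup item).foldl (fun d e => d.modify e [] (· ++ [item])) d) d).getD v [])
        = d.getD v [] ++ a_list.filter (fun item => item.contains v) := by
    induction a_list with
    | nil => intro d; simp
    | cons item rest ih =>
      intro d
      rw [List.foldl_cons, ih, pvNbrInner item v _ (PySem.List.nodup_dedup item),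
        List.filter_cons]
      by_cases hm : v ∈ item
      · simp [hm]
      · simp [hm]
  rw [h, PySem.Dict.getD_empty, List.nil_append]

-- A's fold over one flat element list keeps que = ret.drop i in lockstep with B's fold
lemma pvFold_rel (L : List Int) :
    ∀ (ret : List Int) (ch : PySem.Set Int) (i : Nat), i ≤ ret.length →
      L.foldl (fun s elm =>
          if PySem.Set.contains s.2.2 elm then s
          else (s.1 ++ [elm], s.2.1 ++ [elm], PySem.Set.add s.2.2 elm))
        (ret, ret.drop i, ch)
        = ((L.foldl (fun (s : List Int × PySem.Set Int) elm =>
              if PySem.Set.contains s.2 elm then s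
              else (s.1 ++ [elm], PySem.Set.add s.2 elm)) (ret, ch)).1,
           (L.foldl (fun (s : List Int × PySem.Set Int) elm =>
              if PySem.Set.contains s.2 elm then s
              else (s.1 ++ [elm], PySem.Set.add s.2 elm)) (ret, ch)).1.drop i,
           (L.foldl (fun (s : List Int × PySem.Set Int) elm =>
              if PySem.Set.contains s.2 elm then s
              else (s.1 ++ [elm], PySem.Set.add s.2 elm)) (ret, ch)).2) := by
  induction L with
  | nil => intro ret ch i _; rfl
  | cons elm rest ih =>
    intro ret ch i hi
    simp only [List.foldl_cons]
    by_cases hc : PySem.Set.contains ch elm = true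
    · rw [if_pos hc, if_pos hc]
      exact ih ret ch i hi
    · rw [if_neg hc, if_neg hc, ← List.drop_append_of_le_length hi]
      exact ih (ret ++ [elm]) (PySem.Set.add ch elm) i
        (le_trans hi (by simp))

-- B's fold only appends to ret
lemma pvFoldB_len (L : List Int) :
    ∀ (ret : List Int) (ch : PySem.Set Int),
      ret.length ≤ (L.foldl (fun (s : List Int × PySem.Set Int) elm =>
          if PySem.Set.contains s.2 elm then s
          else (s.1 ++ [elm], PySem.Set.add s.2 elm)) (ret, ch)).1.length := by
  induction L with
  | nil => intro ret ch; exact le_refl _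
  | cons elm rest ih =>
    intro ret ch
    simp only [List.foldl_cons]
    by_cases hc : PySem.Set.contains ch elm = true
    · rw [if_pos hc]
      exact ih ret ch
    · rw [if_neg hc]
      exact le_trans (by simp) (ih (ret ++ [elm]) (PySem.Set.add ch elm))

-- lift the lockstep relation from one element list to a fold over edge lists
lemma pvEdges_rel (items : List (List Int)) :
    ∀ (ret : List Int) (ch : PySem.Set Int) (i : Nat), i ≤ ret.length →
      items.foldl pvInnerA (ret, ret.drop i, ch)
        = ((items.foldl pvInnerB (ret, ch)).1,
           (items.foldl pvInnerB (ret, ch)).1.drop i,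
           (items.foldl pvInnerB (ret, ch)).2) := by
  induction items with
  | nil => intro ret ch i _; rfl
  | cons item rest ih =>
    intro ret ch i hi
    simp only [List.foldl_cons]
    rw [pvInnerA, pvFold_rel item ret ch i hi]
    exact ih _ _ i (le_trans hi (pvFoldB_len item ret ch))

lemma pvInnerB_len (items : List (List Int)) :
    ∀ (ret : List Int) (ch : PySem.Set Int),
      ret.length ≤ (items.foldl pvInnerB (ret, ch)).1.length := by
  induction items with
  | nil => intro ret ch; exact le_refl _
  | cons item rest ih =>
    intro ret ch
    simp only [List.foldl_cons]
    rw [pvInnerB]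
    exact le_trans (pvFoldB_len item ret ch)
      (by rcases h : item.foldl _ (ret, ch) with ⟨r, c⟩
          simpa [h, pvInnerB] using ih r c)

-- A's per-node scan of all edges = a fold over the indexed edges only
lemma pvStep_eq (a_list : List (List Int)) (v : Int)
    (s0 : List Int × List Int × PySem.Set Int) :
    a_list.foldl (fun s item => if item.contains v then pvInnerA s item else s) s0
      = ((pvNbr a_list).getD v []).foldl pvInnerA s0 := by
  rw [pvNbr_getD, PySem.List.foldl_if_eq_foldl_filter]

-- the BFS loops agree whenever que = ret.drop i
lemma pvLoop_eq (a_list : List (List Int)) (fuel : Nat) :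
    ∀ (ret : List Int) (i : Nat) (ch : PySem.Set Int), i ≤ ret.length →
      pvLoopA a_list fuel ret (ret.drop i) ch = pvLoopB (pvNbr a_list) fuel ret i ch := by
  induction fuel with
  | zero => intro ret i ch _; rfl
  | succ f ih =>
    intro ret i ch hi
    by_cases h : i < ret.length
    · rw [List.drop_eq_getElem_cons h]
      simp only [pvLoopA, pvLoopB, dif_pos h]
      rw [pvStep_eq, pvEdges_rel _ ret ch (i+1) h]
      exact ih _ (i+1) _ (le_trans h (pvInnerB_len _ ret ch))
    · rw [List.drop_eq_nil_iff.mpr (Nat.le_of_not_lt h)]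
      simp [pvLoopA, pvLoopB, h]

-- ===== VERDICT =====
theorem get_connected_value_list_spec : Claim_equal_get_connected_value_list := by
  intro a_list start_value _
  unfold Spec_get_connected_value_list get_connected_value_list get_connected_value_list_alt
  exact pvLoop_eq a_list _ [start_value] 0 _ (by simp)
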